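-- pv_equiv track=rewrite | github.com/LineageOS/scripts | dev/utils/mld.py | tuples_with_nones
-- ===== SOURCE A (Python) =====
-- import itertools
-- from collections.abc import Hashable
-- from typing import (
--     Dict,
--     Generator,
--     Generic,
--     List,
--     Sequence,
--     Set,
--     Tuple,
--     TypeVar,
--     Union,
-- )
--
-- def tuples_with_nones(
--     t: Sequence[Hashable],
--     nones_start: int,
-- ) -> Generator[Tuple[Union[Hashable, None], ...], None, None]:
--     choices: List[Tuple[Union[Hashable, None], ...]] = []
--     for i, x in enumerate(t):
--         if i < nones_start:
--             choices.append((x,))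
--         else:
--             choices.append((x, None))
--     yield from itertools.product(*choices)
-- ===== SOURCE B (Python) =====
-- def tuples_with_nones(t, nones_start):
--     # Recursive enumeration over positions instead of choices-list + itertools.product.
--     def gen(i):
--         if i == len(t):
--             yield ()
--             return
--         for rest in gen(i + 1):
--             yield (t[i],) + rest
--         if i >= nones_start:
--             for rest in gen(i + 1):
--                 yield (None,) + rest
--     yield from gen(0)
-- ===== Notes on version B (the rewrite author's own statement) =====
-- stated objective: alternative
-- what changed: Replaces the choices-list plus itertools.product construction with a recursive generator over positions that yields the value-tuple extensions first and then the None extensions.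
import Mathlib
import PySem

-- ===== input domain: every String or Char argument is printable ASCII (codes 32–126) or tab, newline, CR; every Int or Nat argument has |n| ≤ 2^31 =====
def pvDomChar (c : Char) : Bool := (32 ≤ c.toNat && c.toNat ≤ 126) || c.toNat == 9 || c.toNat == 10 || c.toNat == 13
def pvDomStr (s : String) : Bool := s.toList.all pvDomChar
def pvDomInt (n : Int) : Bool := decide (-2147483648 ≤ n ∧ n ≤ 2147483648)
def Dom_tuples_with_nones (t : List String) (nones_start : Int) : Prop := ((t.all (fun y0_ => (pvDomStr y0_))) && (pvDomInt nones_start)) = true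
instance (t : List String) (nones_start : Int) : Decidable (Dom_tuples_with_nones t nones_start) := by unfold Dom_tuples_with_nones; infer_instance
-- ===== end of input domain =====

-- B replaces the choices-list + itertools.product construction by a direct recursive
-- enumeration over positions (same order, value before None); objective: alternative decomposition.

-- ===== PORT A =====
-- itertools.product over a list of choice-lists (last coordinate varies fastest)
def pyProduct (cs : List (List (Option String))) : List (List (Option String)) :=
  match cs with
  | [] => [[]]
  | c :: rest => c.flatMap (fun x => (pyProduct rest).map (fun r => x :: r))

def tuples_with_nones (t : List String) (nones_start : Int) : List (List (Option String)) :=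
  let choices := (t.zipIdx).map (fun p =>
    if (p.2 : Int) < nones_start then [some p.1] else [some p.1, none])
  pyProduct choices

-- ===== PORT B =====
-- gen(i) of Source B: recursion over the suffix of t starting at index i
def genAlt (t : List String) (nones_start : Int) : List String → Nat → List (List (Option String))
  | [], _ => [[]]
  | x :: xs, i =>
      (genAlt t nones_start xs (i + 1)).map (fun r => some x :: r) ++
      (if nones_start ≤ (i : Int) then
        (genAlt t nones_start xs (i + 1)).map (fun r => none :: r)
      else [])

def tuples_with_nones_alt (t : List String) (nones_start : Int) : List (List (Option String)) :=
  genAlt t nones_start t 0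

-- ===== PRECONDITION & SPEC =====
def Spec_tuples_with_nones (t : List String) (nones_start : Int) (out : List (List (Option String))) : Prop := out = tuples_with_nones_alt t nones_start
instance (t : List String) (nones_start : Int) (out : List (List (Option String))) : Decidable (Spec_tuples_with_nones t nones_start out) := by unfold Spec_tuples_with_nones; infer_instance

-- ===== CLAIM (what is proved, stated in full; the proofs are below) =====
def Claim_equal_tuples_with_nones : Prop := ∀ (t : List String) (nones_start : Int), Dom_tuples_with_nones t nones_start → Spec_tuples_with_nones t nones_start (tuples_with_nones t nones_start)

-- ===== LEMMAS AND PROOFS =====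
theorem pyProduct_zipIdx_eq_genAlt (t : List String) (ns : Int) (xs : List String) (i : Nat) :
    pyProduct ((xs.zipIdx i).map (fun p =>
        if (p.2 : Int) < ns then [some p.1] else [some p.1, none]))
      = genAlt t ns xs i := by
  induction xs generalizing i with
  | nil => simp [pyProduct, genAlt]
  | cons x xs ih =>
      simp only [List.zipIdx_cons, List.map_cons, pyProduct, genAlt, ← ih (i + 1)]
      by_cases h : (i : Int) < ns
      · simp [h, not_le.mpr h, List.flatMap_cons, List.flatMap_nil]
      · simp [h, not_lt.mp h, List.flatMap_cons, List.flatMap_nil]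

-- ===== VERDICT (by name: the statement is the Claim_ definition above) =====
theorem tuples_with_nones_spec : Claim_equal_tuples_with_nones := by
  intro t ns _
  show _ = _
  simpa [tuples_with_nones, tuples_with_nones_alt] using
    pyProduct_zipIdx_eq_genAlt t ns t 0
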